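-- pv_equiv track=rewrite | github.com/smcmill2/advent-of-code | 2025/day_03/solution.py | max_jolts
-- ===== SOURCE A (Python) =====
-- def max_jolts(bank: list[int]) -> int:
--     mj = 0
--     d0 = 0
--     for i in range(len(bank) - 1):
--         if bank[i] > d0 and mj // 10 <= d0:
--             d0 = bank[i]
--         else:
--             continue
--
--         d1 = 0
--         for j in range(i + 1, len(bank)):
--             if bank[j] > d1:
--                 d1 = bank[j]
--         mj = max([mj, d0 * 10 + d1])
--
--         if mj // 10 == 9:
--             break
--
--     return mj
-- ===== SOURCE B (Python) =====
-- def max_jolts(bank: list[int]) -> int: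
--     # precompute suffix maxima (floored at 0, matching A's d1 start), then one forward pass
--     suf = []
--     acc = 0
--     for x in reversed(bank):
--         suf.append(acc)
--         acc = max(acc, x)
--     suf.reverse()
--     mj = 0
--     d0 = 0
--     for x, s in zip(bank[:-1], suf):
--         if x > d0 and mj // 10 <= d0:
--             d0 = x
--             mj = max(mj, d0 * 10 + s)
--             if mj // 10 == 9:
--                 break
--     return mj
-- ===== Notes on version B (the rewrite author's own statement) =====
-- stated objective: alternative
-- what changed: B precomputes a suffix-maximum array in one backward pass and zips it with the list, so the single forward pass replaces A's nested max scan with a lookup; worst-case O(n) vs A's O(n^2), though not measurably faster on random inputs where A's break/filter rarely enters the inner scan.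
import Mathlib
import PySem

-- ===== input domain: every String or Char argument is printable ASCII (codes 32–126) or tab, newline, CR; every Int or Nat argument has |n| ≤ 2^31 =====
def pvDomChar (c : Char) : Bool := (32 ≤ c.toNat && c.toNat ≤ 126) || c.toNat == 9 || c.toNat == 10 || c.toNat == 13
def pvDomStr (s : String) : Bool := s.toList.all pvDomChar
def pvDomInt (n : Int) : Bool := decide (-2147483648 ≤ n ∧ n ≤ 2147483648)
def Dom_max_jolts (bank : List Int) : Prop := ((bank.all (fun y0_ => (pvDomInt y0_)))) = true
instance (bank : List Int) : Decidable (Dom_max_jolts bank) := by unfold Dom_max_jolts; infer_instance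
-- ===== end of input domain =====

-- B replaces A's nested max scan with a precomputed suffix-maximum array (alternative single-pass structure).

-- ===== PORT A =====
-- inner loop: for j in range(i+1, len(bank)): if bank[j] > d1: d1 = bank[j]
def aInner (xs : List Int) (d1 : Int) : Int :=
  xs.foldl (fun d1 v => if v > d1 then v else d1) d1

-- outer loop: i over range(len(bank)-1); the element list tail is bank[i+1:];
-- the break is the early return in the `if mj' // 10 == 9` branch
def aOuter : List Int → Int → Int → Int
  | [], mj, _ => mj
  | [_], mj, _ => mj
  | x :: xs, mj, d0 =>
    if x > d0 ∧ PySem.Int.floordiv mj 10 ≤ d0 then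
      let d0' := x
      let d1 := aInner xs 0
      let mj' := max mj (d0' * 10 + d1)
      if PySem.Int.floordiv mj' 10 = 9 then mj' else aOuter xs mj' d0'
    else aOuter xs mj d0

def max_jolts (bank : List Int) : Int := aOuter bank 0 0

-- ===== PORT B =====
-- suffix maxima built right-to-left: (sufB xs).1 = running acc, (sufB xs).2 = suf list
def sufB : List Int → Int × List Int
  | [] => (0, [])
  | x :: xs =>
    let p := sufB xs
    (max p.1 x, p.1 :: p.2)

-- single pass over zip(bank[:-1], suf)
def bLoop : List (Int × Int) → Int → Int → Int
  | [], mj, _ => mj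
  | (x, s) :: rest, mj, d0 =>
    if x > d0 ∧ PySem.Int.floordiv mj 10 ≤ d0 then
      let mj' := max mj (x * 10 + s)
      if PySem.Int.floordiv mj' 10 = 9 then mj' else bLoop rest mj' x
    else bLoop rest mj d0

def max_jolts_alt (bank : List Int) : Int :=
  bLoop (bank.dropLast.zip (sufB bank).2) 0 0

-- ===== PRECONDITION & SPEC =====
def Spec_max_jolts (bank : List Int) (out : Int) : Prop := out = max_jolts_alt bank
instance (bank : List Int) (out : Int) : Decidable (Spec_max_jolts bank out) := by unfold Spec_max_jolts; infer_instance

-- ===== CLAIM (what is proved, stated in full; the proofs are below) =====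
def Claim_equal_max_jolts : Prop := ∀ (bank : List Int), Dom_max_jolts bank → Spec_max_jolts bank (max_jolts bank)

-- ===== LEMMAS AND PROOFS =====

lemma aInner_eq_foldl_max (xs : List Int) (d : Int) :
    aInner xs d = xs.foldl max d := by
  unfold aInner
  induction xs generalizing d with
  | nil => rfl
  | cons x xs ih =>
    simp only [List.foldl]
    rw [ih]
    congr 1
    omega

lemma foldl_max_shift (xs : List Int) (a b : Int) :
    xs.foldl max (max a b) = max a (xs.foldl max b) := by
  induction xs generalizing b with
  | nil => rfl
  | cons x xs ih =>
    simp only [List.foldl]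
    rw [max_assoc, ih]

lemma aInner_eq_sufB (xs : List Int) : aInner xs 0 = (sufB xs).1 := by
  induction xs with
  | nil => rfl
  | cons x xs ih =>
    rw [aInner_eq_foldl_max] at *
    simp only [List.foldl, sufB]
    rw [show max (0 : Int) x = max x 0 from max_comm 0 x, foldl_max_shift, ih, max_comm]

lemma loops_eq (bank : List Int) (mj d0 : Int) :
    aOuter bank mj d0 = bLoop (bank.dropLast.zip (sufB bank).2) mj d0 := by
  induction bank generalizing mj d0 with
  | nil => rfl
  | cons x xs ih =>
    cases xs with
    | nil => rfl
    | cons y ys =>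
      show aOuter (x :: y :: ys) mj d0 = _
      have hdrop : (x :: y :: ys).dropLast = x :: (y :: ys).dropLast := rfl
      simp only [aOuter, sufB, hdrop, List.zip_cons_cons, bLoop]
      rw [aInner_eq_sufB (y :: ys)]
      simp only [sufB]
      split_ifs with h1 h2
      · rfl
      · exact ih _ _
      · exact ih _ _

-- ===== VERDICT (by name: the statement is the Claim_ definition above) =====
theorem max_jolts_spec : Claim_equal_max_jolts := by
  intro bank _
  unfold Spec_max_jolts max_jolts max_jolts_alt
  exact loops_eq bank 0 0
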